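-- pv_equiv track=rewrite | github.com/dileepmenon/GeeksForGeeks | Python/Problems/Diameter_of_Binary_Tree/solution.py | get_dia
-- ===== SOURCE A (Python) =====
-- def get_dia(r1, r2):
--     p = r1[-2::-1]
--     q = r2[-2::-1]
--     for n1, i in enumerate(p):
--         for n2, j in enumerate(q):
--             if i == j:
--                 d1 = n1 + 1
--                 d2 = n2 + 1
--                 return d1+d2+1
-- ===== SOURCE B (Python) =====
-- def get_dia(r1, r2):
--     # Forward passes, no reversing: record the last index of each value in
--     # r2[:-1]; scan r1[:-1] forward keeping the last element also present in
--     # r2[:-1] (= the first element of the reversed list); convert both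
--     # indices arithmetically at the end.
--     last2 = {}
--     for m, v in enumerate(r2[:-1]):
--         last2[v] = m
--     best = None
--     for k, v in enumerate(r1[:-1]):
--         if v in last2:
--             best = (k, last2[v])
--     if best is None:
--         return None
--     k, m = best
--     return (len(r1) - 2 - k) + (len(r2) - 2 - m) + 3
-- ===== Notes on version B (the rewrite author's own statement) =====
-- stated objective: alternative
-- what changed: B never reverses or nests scans: it walks both lists forward once, recording the last index of each value of r2[:-1] and keeping the last element of r1[:-1] present there (which is the first element of A's reversed list), then converts both indices arithmetically at the end.
import Mathlib
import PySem

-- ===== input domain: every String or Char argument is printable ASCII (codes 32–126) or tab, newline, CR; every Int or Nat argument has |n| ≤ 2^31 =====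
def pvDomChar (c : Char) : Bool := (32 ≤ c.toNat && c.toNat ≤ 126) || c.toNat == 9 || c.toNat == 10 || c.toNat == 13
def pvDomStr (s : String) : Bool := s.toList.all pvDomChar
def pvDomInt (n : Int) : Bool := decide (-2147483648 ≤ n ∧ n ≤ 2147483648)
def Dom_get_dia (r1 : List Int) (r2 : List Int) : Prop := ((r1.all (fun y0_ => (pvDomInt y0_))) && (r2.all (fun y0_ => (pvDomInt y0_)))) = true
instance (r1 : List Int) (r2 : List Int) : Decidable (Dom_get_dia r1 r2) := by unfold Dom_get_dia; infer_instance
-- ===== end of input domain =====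

-- B replaces A's reverse-and-nested-scan with two forward passes (last index of each
-- value of r2[:-1] kept in a dict, keep-last scan of r1[:-1]) plus index arithmetic.


-- ===== PORT A =====
-- inner 'for n2, j in enumerate(q): if i == j: return n1+1 + n2+1 + 1'
def getDiaInner (i : Int) (n1 : Int) : List (Int × Int) → Option Int
  | [] => none
  | (n2, j) :: rest =>
    if i = j then some ((n1 + 1) + (n2 + 1) + 1) else getDiaInner i n1 rest

-- outer 'for n1, i in enumerate(p): …' (falls through to the implicit 'return None')
def getDiaOuter (q : List Int) : List (Int × Int) → Option Int
  | [] => none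
  | (n1, i) :: rest =>
    match getDiaInner i n1 (PySem.List.enumerate q) with
    | some v => some v
    | none => getDiaOuter q rest

def get_dia (r1 : List Int) (r2 : List Int) : Option Int :=
  match PySem.List.slice? r1 (some (-2)) none (-1), PySem.List.slice? r2 (some (-2)) none (-1) with
  | some p, some q => getDiaOuter q (PySem.List.enumerate p)
  | _, _ => none   -- unreachable: slice step is -1 ≠ 0

-- ===== PORT B =====
-- 'for m, v in enumerate(r2[:-1]): last2[v] = m'
def lastIdxFold (t2 : List Int) : PySem.Dict Int Int :=
  (PySem.List.enumerate t2).foldl (fun d mv => d.insert mv.2 mv.1) PySem.Dict.empty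

-- 'for k, v in enumerate(r1[:-1]): if v in last2: best = (k, last2[v])'
def bestMatchLoop (d : PySem.Dict Int Int) : List (Int × Int) → Option (Int × Int) → Option (Int × Int)
  | [], best => best
  | (k, v) :: rest, best =>
    match d.get? v with
    | some m => bestMatchLoop d rest (some (k, m))
    | none => bestMatchLoop d rest best

def get_dia_alt (r1 : List Int) (r2 : List Int) : Option Int :=
  let last2 := lastIdxFold (PySem.List.slice r2 none (some (-1)))
  match bestMatchLoop last2 (PySem.List.enumerate (PySem.List.slice r1 none (some (-1)))) none with
  | none => none
  | some (k, m) => some (((r1.length : Int) - 2 - k) + ((r2.length : Int) - 2 - m) + 3)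

-- ===== PRECONDITION & SPEC =====
def Spec_get_dia (r1 : List Int) (r2 : List Int) (out : Option Int) : Prop := out = get_dia_alt r1 r2
instance (r1 : List Int) (r2 : List Int) (out : Option Int) : Decidable (Spec_get_dia r1 r2 out) := by unfold Spec_get_dia; infer_instance

-- ===== CLAIM (what is proved, stated in full; the proofs are below) =====
def Claim_equal_get_dia : Prop := ∀ (r1 : List Int) (r2 : List Int), Dom_get_dia r1 r2 → Spec_get_dia r1 r2 (get_dia r1 r2)

-- ===== LEMMAS AND PROOFS =====

-- A's slice r[-2::-1] is reverse (r[:-1])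
theorem slice_neg2_rev {α : Type} (xs : List α) :
    PySem.List.slice? xs (some (-2)) none (-1) = some xs.dropLast.reverse := by
  unfold PySem.List.slice? PySem.List.sliceIndices
  norm_num
  by_cases h : 1 < xs.length
  · rw [if_pos h]
    have hmax : max (-2 + (xs.length : Int)) (-1) = (xs.length : Int) - 2 := by omega
    rw [hmax]
    have hcnt : ((xs.length : Int) - 2 + 1).toNat = xs.length - 1 := by omega
    rw [hcnt]
    have hcong : ∀ k ∈ List.range (xs.length - 1),
        xs[((xs.length : Int) - 2 + -(k : Int)).toNat]?
          = some (xs[min (xs.length - 2 - k) (xs.length - 1)]'(by omega)) := by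
      intro k hk
      have hk' := List.mem_range.mp hk
      rw [List.getElem?_eq_getElem (by omega)]
      apply congrArg
      exact getElem_congr rfl (by omega) (by omega)
    rw [List.filterMap_congr hcong]
    rw [show (fun (x : Nat) => some (xs[min (xs.length - 2 - x) (xs.length - 1)]'(by omega)))
          = some ∘ (fun (x : Nat) => xs[min (xs.length - 2 - x) (xs.length - 1)]'(by omega)) from rfl,
        List.filterMap_eq_map]
    apply List.ext_getElem
    · simp
    · intro i h1 h2
      simp only [List.getElem_map, List.getElem_range, List.getElem_reverse]
      rw [List.getElem_dropLast]
      exact getElem_congr rfl (by simp [List.length_dropLast]; omega) (by simp; omega)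
  · rw [if_neg h]
    simp only [List.range_zero, List.filterMap_nil]
    have : xs.dropLast = [] := by
      rw [← List.length_eq_zero_iff, List.length_dropLast]
      omega
    simp [this]

-- last index of v in xs (proof-side reference function)
def lastIndex (v : Int) : List Int → Option Nat
  | [] => none
  | x :: rest =>
    match lastIndex v rest with
    | some m => some (m + 1)
    | none => if x = v then some 0 else none

-- first (k, m) in l with d.get? v = some m (proof-side reference function)
def pickHit (d : PySem.Dict Int Int) : List (Int × Int) → Option (Int × Int)
  | [] => none
  | (k, v) :: rest =>
    match d.get? v with
    | some m => some (k, m)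
    | none => pickHit d rest

theorem lastIndex_lt_length (v : Int) (xs : List Int) (m : Nat)
    (h : lastIndex v xs = some m) : m < xs.length := by
  induction xs generalizing m with
  | nil => simp [lastIndex] at h
  | cons x rest ih =>
    simp only [lastIndex] at h
    cases hr : lastIndex v rest with
    | some m' => rw [hr] at h; simp at h; subst h; have := ih m' hr; simp; omega
    | none =>
      rw [hr] at h
      by_cases hx : x = v
      · simp [hx] at h; subst h; simp
      · simp [hx] at h

theorem index?_reverse (xs : List Int) (v : Int) :
    PySem.List.index? xs.reverse v = (lastIndex v xs).map (fun m => xs.length - 1 - m) := by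
  induction xs with
  | nil => simp [lastIndex, PySem.List.index?]
  | cons x rest ih =>
    rw [List.reverse_cons]
    simp only [lastIndex]
    cases hr : lastIndex v rest with
    | some m =>
      have hm := lastIndex_lt_length v rest m hr
      have hmem : v ∈ rest.reverse := by
        have : (PySem.List.index? rest.reverse v).isSome := by
          rw [ih, hr]; simp
        exact (PySem.List.index?_isSome_iff _ _).mp this
      rw [PySem.List.index?_append_of_mem _ hmem, ih, hr]
      simp only [Option.map_some, List.length_cons]
      congr 1
      omega
    | none =>
      have hnm : v ∉ rest.reverse := by
        intro hmem
        have := (PySem.List.index?_isSome_iff rest.reverse v).mpr hmem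
        rw [ih, hr] at this; simp at this
      by_cases hx : x = v
      · subst hx
        rw [PySem.List.index?_append_singleton_self rest.reverse x hnm]
        simp
      · have : PySem.List.index? (rest.reverse ++ [x]) v = none := by
          rw [PySem.List.index?_eq_none_iff]
          simp
          simp [List.mem_reverse] at hnm
          exact ⟨hnm, fun he => hx he.symm⟩
        rw [this]
        simp [hx]

theorem lastIdx_foldl_get? (t2 : List Int) (v : Int) (s : Int) (d : PySem.Dict Int Int) :
    ((PySem.List.enumerate t2 s).foldl (fun d mv => d.insert mv.2 mv.1) d).get? v
      = match lastIndex v t2 with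
        | some m => some (s + m)
        | none => d.get? v := by
  induction t2 generalizing s d with
  | nil => simp [PySem.List.enumerate_nil, lastIndex]
  | cons x rest ih =>
    rw [PySem.List.enumerate_cons]
    simp only [List.foldl_cons, lastIndex]
    rw [ih]
    cases hr : lastIndex v rest with
    | some m => simp only []; congr 1; push_cast; ring
    | none =>
      by_cases hx : x = v
      · subst hx
        simp [PySem.Dict.get?_insert_self]
      · simp only [if_neg hx]
        exact PySem.Dict.get?_insert_of_ne d _ (fun he => hx he.symm)

theorem pickHit_append (d : PySem.Dict Int Int) (a b : List (Int × Int)) :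
    pickHit d (a ++ b) = match pickHit d a with
      | some r => some r
      | none => pickHit d b := by
  induction a with
  | nil => simp [pickHit]
  | cons kv rest ih =>
    obtain ⟨k, v⟩ := kv
    simp only [List.cons_append, pickHit]
    cases d.get? v with
    | some m => rfl
    | none => exact ih

theorem bestMatchLoop_eq_pickHit (d : PySem.Dict Int Int) (l : List (Int × Int))
    (acc : Option (Int × Int)) :
    bestMatchLoop d l acc = match pickHit d l.reverse with
      | some r => some r
      | none => acc := by
  induction l generalizing acc with
  | nil => simp [bestMatchLoop, pickHit]
  | cons kv rest ih =>
    obtain ⟨k, v⟩ := kv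
    rw [List.reverse_cons]
    simp only [bestMatchLoop, pickHit_append]
    cases hv : d.get? v with
    | some m =>
      simp only [hv]
      rw [ih]
      cases pickHit d rest.reverse with
      | some r => rfl
      | none => simp [pickHit, hv]
    | none =>
      simp only [hv]
      rw [ih]
      cases pickHit d rest.reverse with
      | some r => rfl
      | none => simp [pickHit, hv]

theorem pickHit_map (d : PySem.Dict Int Int) (f : Int → Int) (l : List (Int × Int)) :
    pickHit d (l.map (fun p => (f p.1, p.2))) = (pickHit d l).map (fun r => (f r.1, r.2)) := by
  induction l with
  | nil => simp [pickHit]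
  | cons kv rest ih =>
    obtain ⟨k, v⟩ := kv
    simp only [List.map_cons, pickHit]
    cases d.get? v with
    | some m => rfl
    | none => exact ih

theorem pickHit_mem (d : PySem.Dict Int Int) (l : List (Int × Int)) (r : Int × Int)
    (h : pickHit d l = some r) : ∃ kv ∈ l, kv.1 = r.1 ∧ d.get? kv.2 = some r.2 := by
  induction l with
  | nil => simp [pickHit] at h
  | cons kv rest ih =>
    obtain ⟨k, v⟩ := kv
    simp only [pickHit] at h
    cases hv : d.get? v with
    | some m =>
      rw [hv] at h
      simp at h
      exact ⟨(k, v), List.mem_cons_self, by simp [← h, hv]⟩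
    | none =>
      rw [hv] at h
      obtain ⟨kv', hmem, h1, h2⟩ := ih h
      exact ⟨kv', List.mem_cons_of_mem _ hmem, h1, h2⟩

theorem enumerate_reverse (xs : List Int) :
    (PySem.List.enumerate xs).reverse
      = (PySem.List.enumerate xs.reverse).map (fun p => ((xs.length : Int) - 1 - p.1, p.2)) := by
  apply List.ext_getElem
  · simp [PySem.List.length_enumerate]
  · intro i h1 h2
    have hlen : (PySem.List.enumerate xs (0:Int)).length = xs.length := PySem.List.length_enumerate xs 0
    have hi : i < xs.length := by simp [PySem.List.length_enumerate] at h2; exact h2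
    rw [List.getElem_reverse]
    rw [List.getElem_map]
    rw [PySem.List.getElem_enumerate, PySem.List.getElem_enumerate]
    simp only [List.getElem_reverse]
    simp only [hlen, Prod.mk.injEq]
    exact ⟨by omega, trivial⟩

-- A's inner loop over enumerate(q, s) returns the first index of i in q, shifted by s
theorem getDiaInner_eq (i n1 : Int) (q : List Int) (s : Int) :
    getDiaInner i n1 (PySem.List.enumerate q s)
      = (PySem.List.index? q i).map (fun n2 => (n1 + 1) + ((s + n2) + 1) + 1) := by
  induction q generalizing s with
  | nil => simp [getDiaInner, PySem.List.enumerate, PySem.List.index?]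
  | cons j rest ih =>
    rw [PySem.List.enumerate_cons]
    by_cases h : i = j
    · subst h
      rw [PySem.List.index?_cons_self]
      simp [getDiaInner]
    · rw [PySem.List.index?_cons_of_ne rest (fun he => h he.symm)]
      simp only [getDiaInner, if_neg h, ih (s + 1)]
      cases PySem.List.index? rest i with
      | none => rfl
      | some k => simp; ring

-- A's outer loop, against the reference pickHit over the same dict as B builds
theorem outer_vs_pickHit (t2 : List Int) (l : List (Int × Int)) :
    getDiaOuter t2.reverse l
      = (pickHit (lastIdxFold t2) l).map (fun km => km.1 + ((t2.length : Int) - 1 - km.2) + 3) := by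
  induction l with
  | nil => simp [getDiaOuter, pickHit]
  | cons kv rest ih =>
    obtain ⟨n1, i⟩ := kv
    simp only [getDiaOuter, pickHit]
    rw [getDiaInner_eq i n1 t2.reverse 0, index?_reverse]
    have hget : (lastIdxFold t2).get? i
        = match lastIndex i t2 with
          | some m => some ((0:Int) + m)
          | none => none := by
      unfold lastIdxFold
      rw [lastIdx_foldl_get? t2 i 0 PySem.Dict.empty]
      cases lastIndex i t2 with
      | some m => rfl
      | none => exact PySem.Dict.get?_empty i
    rw [hget]
    cases hm : lastIndex i t2 with
    | none => simpa using ih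
    | some m =>
      have hlt := lastIndex_lt_length i t2 m hm
      have hc : ((t2.length - 1 - m : Nat) : Int) = (t2.length : Int) - 1 - m := by omega
      simp [hc]
      ring

-- ===== VERDICT (by name: the statement is the Claim_ definition above) =====
theorem get_dia_spec : Claim_equal_get_dia := by
  intro r1 r2 _
  unfold Spec_get_dia get_dia get_dia_alt
  rw [slice_neg2_rev r1, slice_neg2_rev r2,
      PySem.List.slice_to_neg_one, PySem.List.slice_to_neg_one]
  simp only []
  rw [outer_vs_pickHit]
  rw [bestMatchLoop_eq_pickHit, enumerate_reverse, pickHit_map]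
  cases hp : pickHit (lastIdxFold r2.dropLast) (PySem.List.enumerate r1.dropLast.reverse) with
  | none => simp
  | some r =>
    obtain ⟨n1, m⟩ := r
    obtain ⟨kv, hmem, hk, hv⟩ := pickHit_mem _ _ _ hp
    obtain ⟨k0, hk0, hkv⟩ := (PySem.List.mem_enumerate_iff _ _ _).mp hmem
    have hn1 : n1 = 0 + (k0 : Int) := by rw [show n1 = (n1, m).1 from rfl, ← hk, hkv]
    have hk0' : k0 < r1.dropLast.length := by simpa using hk0
    have ht1 : r1.dropLast.length = r1.length - 1 := List.length_dropLast
    have hr1 : 1 ≤ r1.length := by omega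
    have hget := hv
    unfold lastIdxFold at hget
    rw [lastIdx_foldl_get? r2.dropLast kv.2 0 PySem.Dict.empty] at hget
    cases hli : lastIndex kv.2 r2.dropLast with
    | none => rw [hli] at hget; rw [PySem.Dict.get?_empty] at hget; exact absurd hget (by simp)
    | some m' =>
      rw [hli] at hget
      have hm : m = (m' : Int) := by
        have := hget
        simp at this
        omega
      have hm' := lastIndex_lt_length kv.2 r2.dropLast m' hli
      have ht2 : r2.dropLast.length = r2.length - 1 := List.length_dropLast
      have hr2 : 1 ≤ r2.length := by omega
      simp only [Option.map_some]
      congr 1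
      omega
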